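-- pv_equiv track=rewrite | github.com/Amanatao/DecrypTool | DecrypTool.py | DecodeVigenereCle
-- ===== SOURCE A (Python) =====
-- def DecodeVigenereCle (code, l) :
--     """
--     Détermine la cle du message code, connaissant sa longueur,
--     on suppose que la lettre E est la lettre la plus fréquente
--
--     @param      code        message codé
--     @param      l           longueur probable de la clé
--     @return                 message décodé
--     """
--     al  = "".join([ chr(97+i) for i in range(0,26) ])
--     al  = al.upper ()
--     cle = ""
--     for i in range (0, l) :
--         nombre = [ 0 for a in al]
--         sous   = code [i:len (code):l]  # on extrait toutes les lettres
--                                         # i, i+l, i+2l; i+3l, ...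
--
--         # on compte les lettres
--         for k in sous : nombre [ al.find (k) ] += 1
--
--         # on cherche le maximum
--         p = 0
--         for k in range (0, len (nombre)) :
--             if nombre [k] > nombre [p] : p = k
--
--         # on suppose que al [p] est la lettre E code,
--         # il ne reste plus qu'a trouver la lettre de la cle
--         # qui a permis de coder E en al [p]
--         cle += al [ (p + 26 - al.find ("E")) % 26 ]
--
--     return cle
-- ===== SOURCE B (Python) =====
-- def DecodeVigenereCle(code, l):
--     al = "ABCDEFGHIJKLMNOPQRSTUVWXYZ"
--     if l <= 0:
--         return ""
--     # one pass: tally every position into its column's 26-bucket row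
--     counts = {}
--     for idx, c in enumerate(code):
--         counts.setdefault(idx % l, [0] * 26)[al.find(c)] += 1
--     zero = [0] * 26
--     key = []
--     for i in range(l):
--         row = counts.get(i, zero)
--         p = 0
--         for k in range(26):
--             if row[k] > row[p]:
--                 p = k
--         key.append(al[(p + 22) % 26])
--     return "".join(key)
-- ===== Notes on version B (the rewrite author's own statement) =====
-- stated objective: alternative
-- what changed: Replaces the per-column stride slicing (l separate passes code[i::l] each with its own counting loop) by a single left-to-right pass that tallies every character into a dict row keyed by idx % l, then reads the l rows off; argmax and key-letter derivation are kept, with al.find's -1 still landing in the last bucket.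
import Mathlib
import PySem

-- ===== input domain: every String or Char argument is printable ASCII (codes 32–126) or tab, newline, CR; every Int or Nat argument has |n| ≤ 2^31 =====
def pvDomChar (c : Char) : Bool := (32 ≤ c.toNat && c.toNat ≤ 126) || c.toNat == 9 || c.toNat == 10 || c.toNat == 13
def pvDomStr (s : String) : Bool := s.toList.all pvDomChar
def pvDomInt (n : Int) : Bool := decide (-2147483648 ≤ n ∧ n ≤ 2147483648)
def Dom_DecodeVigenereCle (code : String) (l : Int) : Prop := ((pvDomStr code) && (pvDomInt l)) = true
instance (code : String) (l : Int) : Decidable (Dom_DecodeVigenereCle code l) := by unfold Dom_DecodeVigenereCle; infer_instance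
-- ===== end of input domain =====

-- B replaces A's l stride-slices code[i::l] (one counting pass per column) by ONE pass over the
-- text tallying into per-column rows keyed by idx % l; same argmax and key-letter rule.

-- ===== PORT A =====
-- literal transliteration of A: for each i in range(l), slice code[i:len(code):l],
-- count letters (al.find = -1 for foreign chars → Python index -1, the last bucket),
-- take the first strict argmax, append al[(p + 26 - al.find("E")) % 26].
def DecodeVigenereCle (code : String) (l : Int) : String :=
  let al := PySem.Chars.upper ((PySem.List.pyRange 0 26 1).map (fun i => Char.ofNat (97 + i).toNat))
  let cle := (PySem.List.pyRange 0 l 1).foldl (fun cle i =>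
    let nombre := al.map (fun _ => (0 : Int))
    -- inside the loop 0 < l, so slice? never returns none; getD [] only totalizes
    let sous := (PySem.List.slice? code.toList (some i) (some (PySem.Str.len code)) l).getD []
    let nombre := sous.foldl (fun nombre k =>
      PySem.List.pySetD nombre (PySem.Chars.find al [k])
        (PySem.List.pyGetD nombre (PySem.Chars.find al [k]) 0 + 1)) nombre
    let p := (PySem.List.pyRange 0 (PySem.List.len nombre) 1).foldl (fun p k =>
      if PySem.List.pyGetD nombre k 0 > PySem.List.pyGetD nombre p 0 then k else p) 0
    cle ++ [PySem.List.pyGetD al (PySem.Int.mod (p + 26 - PySem.Chars.find al ['E']) 26) ' ']) []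
  String.ofList cle

-- ===== PORT B =====
-- literal transliteration of Source B: one pass with counts.setdefault(idx % l, [0]*26)[al.find(c)] += 1,
-- then for each column read the row (default all-zero), argmax, al[(p + 22) % 26].
def DecodeVigenereCle_alt (code : String) (l : Int) : String :=
  let al := "ABCDEFGHIJKLMNOPQRSTUVWXYZ".toList
  if l ≤ 0 then "" else
  let counts := (PySem.List.enumerate code.toList 0).foldl (fun d q =>
    d.modify (PySem.Int.mod q.1 l) (List.replicate 26 (0 : Int)) (fun row =>
      PySem.List.pySetD row (PySem.Chars.find al [q.2])
        (PySem.List.pyGetD row (PySem.Chars.find al [q.2]) 0 + 1))) PySem.Dict.empty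
  let key := (PySem.List.pyRange 0 l 1).foldl (fun key i =>
    let row := counts.getD i (List.replicate 26 (0 : Int))
    let p := (PySem.List.pyRange 0 26 1).foldl (fun p k =>
      if PySem.List.pyGetD row k 0 > PySem.List.pyGetD row p 0 then k else p) 0
    key ++ [PySem.List.pyGetD al (PySem.Int.mod (p + 22) 26) ' ']) []
  String.ofList key

-- ===== PRECONDITION & SPEC =====
def Spec_DecodeVigenereCle (code : String) (l : Int) (out : String) : Prop := out = DecodeVigenereCle_alt code l
instance (code : String) (l : Int) (out : String) : Decidable (Spec_DecodeVigenereCle code l out) := by unfold Spec_DecodeVigenereCle; infer_instance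

-- ===== CLAIM (what is proved, stated in full; the proofs are below) =====
def Claim_equal_DecodeVigenereCle : Prop := ∀ (code : String) (l : Int), Dom_DecodeVigenereCle code l → Spec_DecodeVigenereCle code l (DecodeVigenereCle code l)

-- ===== LEMMAS AND PROOFS =====

-- the alphabet A builds is the literal alphabet B uses
lemma alA_eq : PySem.Chars.upper ((PySem.List.pyRange 0 26 1).map (fun i => Char.ofNat (97 + i).toNat)) = "ABCDEFGHIJKLMNOPQRSTUVWXYZ".toList := by decide

-- reading a key of a modify-fold = folding the updates of the entries with that key
lemma getD_foldl_modify_key_fn {κ ν α : Type} [BEq κ] [LawfulBEq κ] [DecidableEq κ]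
    (xs : List α) (key : α → κ) (d0 : ν) (g : α → ν → ν) (d : PySem.Dict κ ν) (c : κ) :
    (xs.foldl (fun d x => d.modify (key x) d0 (g x)) d).getD c d0 =
      (xs.filter (fun x => key x == c)).foldl (fun b x => g x b) (d.getD c d0) := by
  induction xs generalizing d with
  | nil => simp
  | cons x xs ih =>
    simp only [List.foldl_cons, List.filter_cons]
    by_cases h : key x = c
    · simp [h, ih]
    · have hb : (key x == c) = false := by simp [h]
      simp [hb, ih, PySem.Dict.getD_modify, Ne.symm h]

-- x % l = i characterised arithmetically (0 ≤ i < l, 0 ≤ x)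
lemma modsub (x i l : Int) (hl : 0 < l) (h0 : 0 ≤ i) (hil : i < l) (hx : 0 ≤ x) :
    (PySem.Int.mod x l = i) ↔ (i ≤ x ∧ l ∣ x - i) := by
  rw [PySem.Int.mod_eq_emod_of_pos hl]
  constructor
  · intro h
    have hdvd : l ∣ x - i := by
      have : (x - i) % l = 0 := by
        rw [Int.sub_emod, h, Int.emod_eq_of_lt h0 hil]; simp
      exact Int.dvd_of_emod_eq_zero this
    refine ⟨?_, hdvd⟩
    by_contra hlt
    push_neg at hlt
    have h2 : l ≤ i - x := Int.le_of_dvd (by omega) (by simpa using hdvd.neg_right)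
    omega
  · rintro ⟨hle, hdvd⟩
    have : x % l = i % l := Int.emod_eq_emod_iff_emod_sub_eq_zero.mpr (Int.emod_eq_zero_of_dvd hdvd)
    rw [this, Int.emod_eq_of_lt h0 hil]

-- range(a, b, s) with 0 < s is strictly increasing
lemma sorted_pyRange (a b s : Int) (hs : 0 < s) : List.Pairwise (· < ·) (PySem.List.pyRange a b s) := by
  rw [PySem.List.pyRange_of_pos a b hs]
  apply List.Pairwise.map
  · intro x y h
    have : s * (x:Int) < s * y := by
      apply mul_lt_mul_of_pos_left _ hs
      exact_mod_cast h
    omega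
  · exact List.pairwise_lt_range

-- the indices 0 ≤ j < n with j % l = i are exactly range(i, n, l)  (0 ≤ i < l)
lemma filter_mod_eq_pyRange (n i l : Int) (hl : 0 < l) (h0 : 0 ≤ i) (hil : i < l) :
    (PySem.List.pyRange 0 n 1).filter (fun j => PySem.Int.mod j l == i) =
      PySem.List.pyRange i n l := by
  apply List.Perm.eq_of_pairwise (le := (· < ·))
  · intro a b _ _ hab hba; omega
  · exact List.Pairwise.filter _ (sorted_pyRange 0 n 1 one_pos)
  · exact sorted_pyRange i n l hl
  · rw [List.perm_ext_iff_of_nodup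
      (List.Pairwise.nodup (List.Pairwise.filter _ (sorted_pyRange 0 n 1 one_pos)))
      (List.Pairwise.nodup (sorted_pyRange i n l hl))]
    intro x
    rw [List.mem_filter, PySem.List.mem_pyRange_one, PySem.List.mem_pyRange_iff_of_pos hl]
    constructor
    · rintro ⟨⟨hx0, hxn⟩, hm⟩
      have := (modsub x i l hl h0 hil hx0).mp (by simpa using hm)
      exact ⟨this.1, hxn, this.2⟩
    · rintro ⟨hix, hxn, hd⟩
      refine ⟨⟨by omega, hxn⟩, ?_⟩
      simpa using (modsub x i l hl h0 hil (by omega)).mpr ⟨hix, hd⟩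

-- the stride slice xs[i:len(xs):l] lists xs at the indices of range(i, len(xs), l)
lemma sliceD_eq {α : Type} (xs : List α) (i l : Int) (d : α) (h0 : 0 ≤ i) (hl : 0 < l) :
    (PySem.List.slice? xs (some i) (some (PySem.List.len xs)) l).getD [] =
      (PySem.List.pyRange i (PySem.List.len xs) l).map (fun j => PySem.List.pyGetD xs j d) := by
  have hln : PySem.List.len xs = (xs.length : Int) := PySem.List.len_eq xs
  rw [hln, PySem.List.pyRange_of_pos i _ hl]
  unfold PySem.List.slice? PySem.List.sliceIndices
  simp only [show ¬ (l = 0) by omega, show ¬ (l < 0) by omega, show ¬ (i < 0) by omega,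
    show ¬ ((xs.length : Int) < 0) by omega, if_false, if_pos hl, min_self, Option.getD_some]
  by_cases hin : i < (xs.length : Int)
  · have hmin : min i (xs.length : Int) = i := by omega
    simp only [hmin, if_pos hin]
    set q : Int := ((xs.length : Int) - i + l - 1) / l with hq
    have hdm := Int.mul_ediv_add_emod ((xs.length : Int) - i + l - 1) l
    have hr0 : 0 ≤ ((xs.length : Int) - i + l - 1) % l := Int.emod_nonneg _ (by omega)
    have hrl : ((xs.length : Int) - i + l - 1) % l < l := Int.emod_lt_of_pos _ hl
    have hbound : ∀ k : Nat, k < q.toNat → i + l * (k : Int) < (xs.length : Int) := by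
      intro k hk
      have hkq : (k : Int) ≤ q - 1 := by omega
      have h2 : l * (k : Int) ≤ l * (q - 1) := mul_le_mul_of_nonneg_left hkq (by omega)
      nlinarith [h2]
    have hnn : ∀ k : Nat, (0:Int) ≤ i + l * (k : Int) := by
      intro k
      have : (0:Int) ≤ l * (k : Int) := mul_nonneg (by omega) (by positivity)
      omega
    rw [List.filterMap_congr (g := fun k : Nat => some (xs.getD (i + l * (k : Int)).toNat d)) ?_]
    · rw [show (fun k : Nat => some (xs.getD (i + l * (k : Int)).toNat d))
            = some ∘ (fun k : Nat => xs.getD (i + l * (k : Int)).toNat d) from rfl,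
          List.filterMap_eq_map, List.map_map]
      apply List.map_congr_left
      intro k hk
      simp only [Function.comp]
      rw [PySem.List.pyGetD_of_nonneg xs d (hnn k)]
    · intro k hk
      have h1 := hbound k (List.mem_range.mp hk)
      have h2 := hnn k
      have h3 : (i + l * (k : Int)).toNat < xs.length := by omega
      simp [List.getElem?_eq_getElem h3, List.getD_eq_getElem?_getD]
  · have hmin : min i (xs.length : Int) = (xs.length : Int) := by omega
    simp [hmin, hin]

-- counting preserves the length of the bucket row
lemma length_foldl_incr (al : List Char) (ys : List Char) (init : List Int) :
    (ys.foldl (fun nombre k =>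
      PySem.List.pySetD nombre (PySem.Chars.find al [k])
        (PySem.List.pyGetD nombre (PySem.Chars.find al [k]) 0 + 1)) init).length = init.length := by
  induction ys generalizing init with
  | nil => rfl
  | cons y ys ih => simp [List.foldl_cons, ih, PySem.List.length_pySetD]

-- per column 0 ≤ i < l: B's dict row for column i equals A's count over the stride slice
lemma col_eq (xs : List Char) (i l : Int) (h0 : 0 ≤ i) (hil : i < l) :
    (((PySem.List.enumerate xs 0).foldl (fun d q =>
        d.modify (PySem.Int.mod q.1 l) (List.replicate 26 (0:Int)) (fun row =>
          PySem.List.pySetD row (PySem.Chars.find "ABCDEFGHIJKLMNOPQRSTUVWXYZ".toList [q.2])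
            (PySem.List.pyGetD row (PySem.Chars.find "ABCDEFGHIJKLMNOPQRSTUVWXYZ".toList [q.2]) 0 + 1)))
        PySem.Dict.empty).getD i (List.replicate 26 (0:Int))) =
    ((PySem.List.slice? xs (some i) (some (PySem.List.len xs)) l).getD []).foldl (fun nombre k =>
        PySem.List.pySetD nombre (PySem.Chars.find "ABCDEFGHIJKLMNOPQRSTUVWXYZ".toList [k])
          (PySem.List.pyGetD nombre (PySem.Chars.find "ABCDEFGHIJKLMNOPQRSTUVWXYZ".toList [k]) 0 + 1))
      (List.replicate 26 (0:Int)) := by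
  have hl : 0 < l := by omega
  rw [getD_foldl_modify_key_fn (PySem.List.enumerate xs 0)
      (fun q : Int × Char => PySem.Int.mod q.1 l) (List.replicate 26 (0:Int))
      (fun q row =>
        PySem.List.pySetD row (PySem.Chars.find "ABCDEFGHIJKLMNOPQRSTUVWXYZ".toList [q.2])
          (PySem.List.pyGetD row (PySem.Chars.find "ABCDEFGHIJKLMNOPQRSTUVWXYZ".toList [q.2]) 0 + 1))
      PySem.Dict.empty i, PySem.Dict.getD_empty]
  rw [PySem.List.enumerate_eq_map_pyRange xs ' ', List.filter_map]
  rw [sliceD_eq xs i l ' ' h0 hl]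
  rw [List.foldl_map, List.foldl_map]
  rw [show ((fun q : Int × Char => PySem.Int.mod q.1 l == i) ∘
        (fun j => (j, PySem.List.pyGetD xs j ' '))) = (fun j => PySem.Int.mod j l == i) from rfl]
  rw [filter_mod_eq_pyRange (PySem.List.len xs) i l hl h0 hil]

-- ===== VERDICT (by name: the statement is the Claim_ definition above) =====
theorem DecodeVigenereCle_spec : Claim_equal_DecodeVigenereCle := by
  intro code l _
  unfold Spec_DecodeVigenereCle DecodeVigenereCle DecodeVigenereCle_alt
  by_cases hl : l ≤ 0
  · rw [if_pos hl]
    have h : PySem.List.pyRange 0 l 1 = [] := by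
      rw [PySem.List.pyRange_of_pos 0 l one_pos]
      simp [show ¬ ((0:Int) < l) by omega]
    rw [h]
    rfl
  · rw [if_neg hl]
    simp only [alA_eq]
    congr 1
    apply PySem.List.foldl_congr_mem
    intro acc i hi
    have hmem := PySem.List.mem_pyRange_one.mp hi
    have hlen : PySem.Str.len code = PySem.List.len code.toList := by
      simp [PySem.Str.len_eq, PySem.List.len_eq]
    simp only [hlen]
    have hz : ("ABCDEFGHIJKLMNOPQRSTUVWXYZ".toList).map (fun _ => (0:Int)) =
        List.replicate 26 (0:Int) := by decide
    simp only [hz]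
    rw [← col_eq code.toList i l hmem.1 hmem.2]
    have h26 : PySem.List.len (((PySem.List.enumerate code.toList 0).foldl (fun d q =>
        d.modify (PySem.Int.mod q.1 l) (List.replicate 26 (0:Int)) (fun row =>
          PySem.List.pySetD row (PySem.Chars.find "ABCDEFGHIJKLMNOPQRSTUVWXYZ".toList [q.2])
            (PySem.List.pyGetD row (PySem.Chars.find "ABCDEFGHIJKLMNOPQRSTUVWXYZ".toList [q.2]) 0 + 1)))
        PySem.Dict.empty).getD i (List.replicate 26 (0:Int))) = 26 := by
      rw [col_eq code.toList i l hmem.1 hmem.2, PySem.List.len_eq, length_foldl_incr]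
      simp
    rw [h26]
    rw [show PySem.Chars.find "ABCDEFGHIJKLMNOPQRSTUVWXYZ".toList ['E'] = (4:Int) from by decide]
    have harith : ∀ p : Int, p + 26 - 4 = p + 22 := fun p => by ring
    rw [harith]
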